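-- pv_equiv track=rewrite | github.com/theroyaritra/IITMadrasPythonCodeBase | Practice Test Codes/OPPE1_Mock4.py | exact_count
-- ===== SOURCE A (Python) =====
-- def exact_count(para, n):
--     """
--     Determine if at least one word occurs exactly n times
--
--     Arguments:
--         para: string
--         n: integer
--     Return:
--         result: bool
--     """
--     l=[]
--     s=''
--     for e in para:
--         if(e!=' '):
--             s=s+e
--         else:
--             l.append(s)
--             s=''
--     l.append(s)
--     d={}
--     for e in l:
--         if(e not in d):
--             d[e]=1
--         else:
--             d[e]+=1
--     f=False
--     for key in d:
--         if(d[key]==n):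
--             f=True
--             break
--         else:
--             f=False
--     return f
-- ===== SOURCE B (Python) =====
-- def exact_count(para, n):
--     words = para.split(' ')
--     while words:
--         w = words[0]
--         rest = [x for x in words if x != w]
--         if len(words) - len(rest) == n:
--             return True
--         words = rest
--     return False
-- ===== Notes on version B (the rewrite author's own statement) =====
-- stated objective: alternative
-- what changed: replaces A's character-accumulator split, dict-counting pass and key-scan loop by a partition-refinement loop: repeatedly take the first remaining word, obtain its count as the length drop after filtering it out, and shrink the list until a count hits n; no counting container is kept at all
import Mathlib
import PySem

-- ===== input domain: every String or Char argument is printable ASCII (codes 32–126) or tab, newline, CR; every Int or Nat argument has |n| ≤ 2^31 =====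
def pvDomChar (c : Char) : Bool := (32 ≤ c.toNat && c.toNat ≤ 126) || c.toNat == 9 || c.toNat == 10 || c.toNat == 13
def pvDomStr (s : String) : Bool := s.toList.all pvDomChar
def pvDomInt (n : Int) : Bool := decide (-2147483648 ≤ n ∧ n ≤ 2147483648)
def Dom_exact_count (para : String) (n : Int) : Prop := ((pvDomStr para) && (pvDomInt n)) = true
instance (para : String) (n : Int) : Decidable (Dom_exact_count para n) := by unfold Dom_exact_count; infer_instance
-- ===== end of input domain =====

-- B replaces A's split+dict-count+key-scan by a partition-refinement loop over the word list (alternative decomposition, not faster).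

-- ===== PORT A =====
-- A's final loop 'for key in d: if d[key]==n: f=True; break else: f=False' (break returns the current f=True)
def exactCountKeyLoop (d : PySem.Dict (List Char) Int) (n : Int) : List (List Char) → Bool → Bool
  | [], f => f
  | k :: rest, _ => if d.getD k 0 == n then true else exactCountKeyLoop d n rest false

def exact_count (para : String) (n : Int) : Bool :=
  -- l=[]; s=''; for e in para: …   (words kept as List Char)
  let st := para.toList.foldl
    (fun (st : List (List Char) × List Char) e =>
      if e ≠ ' ' then (st.1, st.2 ++ [e]) else (st.1 ++ [st.2], []))
    ([], [])
  let l := st.1 ++ [st.2]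
  -- d={}; for e in l: if e not in d: d[e]=1 else: d[e]+=1
  let d := l.foldl
    (fun (d : PySem.Dict (List Char) Int) e =>
      if d.contains e = false then d.insert e 1 else d.insert e (d.getD e 0 + 1))
    PySem.Dict.empty
  exactCountKeyLoop d n d.keys false

-- ===== PORT B =====
-- while words: w=words[0]; rest=[x for x in words if x!=w]; if len(words)-len(rest)==n: return True; words=rest
def ecLoop (n : Int) : List (List Char) → Bool
  | [] => false
  | w :: rest =>
      let rem := (w :: rest).filter (fun x => x ≠ w)
      if ((((w :: rest).length : Int) - (rem.length : Int)) == n) then true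
      else ecLoop n rem
termination_by l => l.length
decreasing_by
  simp only [List.filter_cons]
  simp
  exact List.length_filter_le _ _

def exact_count_alt (para : String) (n : Int) : Bool :=
  -- words = para.split(' ')  (non-empty literal separator: PySem.Chars.splitOn is exact here)
  ecLoop n (PySem.Chars.splitOn para.toList " ".toList)

-- ===== PRECONDITION & SPEC =====
def Spec_exact_count (para : String) (n : Int) (out : Bool) : Prop := out = exact_count_alt para n
instance (para : String) (n : Int) (out : Bool) : Decidable (Spec_exact_count para n out) := by unfold Spec_exact_count; infer_instance

-- ===== CLAIM (what is proved, stated in full; the proofs are below) =====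
def Claim_equal_exact_count : Prop := ∀ (para : String) (n : Int), Dom_exact_count para n → Spec_exact_count para n (exact_count para n)

-- ===== LEMMAS AND PROOFS =====

-- reference single-space split (structural recursion), used only by the proofs
def pvConsHead (s : List Char) : List (List Char) → List (List Char)
  | [] => [s]
  | h :: t => (s ++ h) :: t

def pvMsp : List Char → List (List Char)
  | [] => [[]]
  | c :: cs => if c = ' ' then [] :: pvMsp cs else pvConsHead [c] (pvMsp cs)

lemma pvMsp_ne_nil (cs : List Char) : pvMsp cs ≠ [] := by
  cases cs with
  | nil => simp [pvMsp]
  | cons c cs =>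
    simp only [pvMsp]
    split
    · simp
    · cases h : pvMsp cs <;> simp [pvConsHead]

lemma pvConsHead_nil (X : List (List Char)) (hne : X ≠ []) : pvConsHead [] X = X := by
  cases X with
  | nil => exact absurd rfl hne
  | cons h t => simp [pvConsHead]

lemma pvConsHead_consHead (s t : List Char) (X : List (List Char)) :
    pvConsHead s (pvConsHead t X) = pvConsHead (s ++ t) X := by
  cases X <;> simp [pvConsHead]

-- A's split loop computes pvMsp
lemma fold_split (cs : List Char) (l : List (List Char)) (s : List Char) :
    (cs.foldl
      (fun (st : List (List Char) × List Char) e =>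
        if e ≠ ' ' then (st.1, st.2 ++ [e]) else (st.1 ++ [st.2], []))
      (l, s)).1 ++
    [(cs.foldl
      (fun (st : List (List Char) × List Char) e =>
        if e ≠ ' ' then (st.1, st.2 ++ [e]) else (st.1 ++ [st.2], []))
      (l, s)).2] = l ++ pvConsHead s (pvMsp cs) := by
  induction cs generalizing l s with
  | nil => simp [pvMsp, pvConsHead]
  | cons c cs ih =>
    by_cases hc : c = ' '
    · subst hc
      have hif : (if (' ' : Char) ≠ ' ' then (l, s ++ [' ']) else (l ++ [s], ([] : List Char)))
          = (l ++ [s], ([] : List Char)) := by simp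
      simp only [List.foldl_cons, hif]
      rw [ih, pvMsp, if_pos rfl, pvConsHead_nil _ (pvMsp_ne_nil cs)]
      simp [pvConsHead]
    · have hif : (if c ≠ ' ' then (l, s ++ [c]) else (l ++ [s], ([] : List Char)))
          = (l, s ++ [c]) := by simp [hc]
      simp only [List.foldl_cons, hif]
      rw [ih, pvMsp, if_neg hc, pvConsHead_consHead]

-- B's split (library splitOn on the single-char separator) also computes pvMsp
lemma go_eq (fuel : Nat) (l cur : List Char) (acc : List (List Char)) (h : l.length < fuel) :
    PySem.Chars.splitOn.go [' '] fuel l cur acc = acc.reverse ++ pvConsHead cur.reverse (pvMsp l) := by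
  induction fuel generalizing l cur acc with
  | zero => omega
  | succ fuel ih =>
    cases l with
    | nil => simp [PySem.Chars.splitOn.go, pvMsp, pvConsHead]
    | cons c rest =>
      by_cases hc : c = ' '
      · subst hc
        rw [show PySem.Chars.splitOn.go [' '] (fuel + 1) (' ' :: rest) cur acc
              = PySem.Chars.splitOn.go [' '] fuel rest [] (cur.reverse :: acc) by
            simp [PySem.Chars.splitOn.go, List.isPrefixOf]]
        rw [ih rest [] (cur.reverse :: acc) (by simpa using Nat.lt_of_succ_lt_succ h)]
        simp only [List.reverse_nil, List.reverse_cons]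
        rw [pvMsp, if_pos rfl, pvConsHead_nil _ (pvMsp_ne_nil rest)]
        simp [pvConsHead]
      · rw [show PySem.Chars.splitOn.go [' '] (fuel + 1) (c :: rest) cur acc
              = PySem.Chars.splitOn.go [' '] fuel rest (c :: cur) acc by
            simp [PySem.Chars.splitOn.go, List.isPrefixOf, Ne.symm hc]]
        rw [ih rest (c :: cur) acc (by simpa using Nat.lt_of_succ_lt_succ h)]
        rw [pvMsp, if_neg hc, pvConsHead_consHead]
        simp

lemma splitOn_eq_pvMsp (s : List Char) : PySem.Chars.splitOn s [' '] = pvMsp s := by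
  unfold PySem.Chars.splitOn
  rw [go_eq _ _ _ _ (Nat.lt_succ_self _)]
  simp [pvConsHead_nil _ (pvMsp_ne_nil s)]

-- A's key loop with initial f=False is an any over the keys
lemma keyLoop_eq_any (d : PySem.Dict (List Char) Int) (n : Int) (ks : List (List Char)) :
    exactCountKeyLoop d n ks false = ks.any (fun k => d.getD k 0 == n) := by
  induction ks with
  | nil => rfl
  | cons k rest ih =>
    simp only [exactCountKeyLoop, List.any_cons]
    by_cases h : (d.getD k 0 == n) = true <;> simp [h, ih]

lemma any_ofList {α : Type} [BEq α] [LawfulBEq α] (l : List α) (p : α → Bool) :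
    (PySem.Set.ofList l).any p = l.any p := by
  rw [Bool.eq_iff_iff]
  simp [List.any_eq_true, PySem.Set.mem_ofList]

-- split the length of a list into count of w plus length of the ≠-w filter
lemma length_split_count (l : List (List Char)) (w : List Char) :
    l.length = l.count w + (l.filter (fun x => x ≠ w)).length := by
  induction l with
  | nil => simp
  | cons a t ih =>
    by_cases h : a = w
    · subst h; simp only [List.count_cons, List.filter_cons]; simp [ih]; omega
    · simp only [List.count_cons, List.filter_cons]; simp [h, ih]
      omega

-- the ≠-w filter drops the head and keeps the tail's filter
lemma filter_ne_cons_self (w : List Char) (rest : List (List Char)) :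
    (w :: rest).filter (fun x => x ≠ w) = rest.filter (fun x => x ≠ w) := by
  simp

lemma if_eq_or (c x : Bool) : (if c = true then true else x) = (c || x) := by
  cases c <;> simp

-- 'some count equals n' over a list = head's count hits n, or some count hits n in the ≠-head filter
lemma any_count_step (n : Int) (w : List Char) (t : List (List Char)) :
    (w :: t).any (fun x => (((w :: t).count x : Int) == n))
    = ((((w :: t).count w : Int) == n)
       || ((w :: t).filter (fun x => x ≠ w)).any
            (fun x => ((((w :: t).filter (fun x => x ≠ w)).count x : Int) == n))) := by
  rw [Bool.eq_iff_iff]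
  simp only [List.any_eq_true, Bool.or_eq_true, beq_iff_eq]
  constructor
  · rintro ⟨x, hxl, hx⟩
    by_cases hxw : x = w
    · subst hxw; left; exact hx
    · right
      refine ⟨x, List.mem_filter_of_mem hxl (by simpa using hxw), ?_⟩
      rw [List.count_filter (by simpa using hxw)]; exact hx
  · rintro (h | ⟨x, hxm, hx⟩)
    · exact ⟨w, by simp, h⟩
    · have hxw : x ≠ w := by simpa using List.of_mem_filter hxm
      refine ⟨x, List.mem_of_mem_filter hxm, ?_⟩
      rw [List.count_filter (by simpa using hxw)] at hx
      exact hx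

-- B's partition-refinement loop detects exactly 'some word's count equals n'
lemma ecLoop_eq_any_fuel (n : Int) (L : Nat) : ∀ (l : List (List Char)), l.length ≤ L →
    ecLoop n l = l.any (fun w => ((l.count w : Int) == n)) := by
  induction L with
  | zero =>
    intro l hl
    have hnil : l = [] := List.eq_nil_of_length_eq_zero (Nat.le_zero.mp hl)
    subst hnil
    rw [ecLoop.eq_def]; simp
  | succ L ih =>
    intro l hl
    cases l with
    | nil => rw [ecLoop.eq_def]; simp
    | cons w rest =>
      rw [ecLoop.eq_def]
      show (if (((((w :: rest).length : Int) - (((w :: rest).filter (fun x => x ≠ w)).length : Int)) == n) = true)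
              then true else ecLoop n ((w :: rest).filter (fun x => x ≠ w)))
          = (w :: rest).any (fun x => (((w :: rest).count x : Int) == n))
      have hsplit := length_split_count (w :: rest) w
      have hcnt : (((w :: rest).length : Int) - ((((w :: rest).filter (fun x => x ≠ w)).length : Int)))
          = ((w :: rest).count w : Int) := by omega
      have hremle : ((w :: rest).filter (fun x => x ≠ w)).length ≤ L := by
        have h1 : ((w :: rest).filter (fun x => x ≠ w)).length ≤ rest.length := by
          rw [filter_ne_cons_self]
          exact List.length_filter_le _ _
        have h2 : rest.length + 1 ≤ L + 1 := by simpa using hl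
        omega
      rw [hcnt, ih _ hremle, if_eq_or, any_count_step]

lemma ecLoop_eq_any (n : Int) (l : List (List Char)) :
    ecLoop n l = l.any (fun w => ((l.count w : Int) == n)) :=
  ecLoop_eq_any_fuel n l.length l (Nat.le_refl _)

-- ===== VERDICT (by name: the statement is the Claim_ definition above) =====
theorem exact_count_spec : Claim_equal_exact_count := by
  intro para n _
  unfold Spec_exact_count exact_count exact_count_alt
  simp only []
  have hwords : PySem.Chars.splitOn para.toList " ".toList = pvMsp para.toList := by
    rw [show (" ".toList : List Char) = [' '] from rfl, splitOn_eq_pvMsp]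
  have hl := fold_split para.toList [] []
  rw [pvConsHead_nil _ (pvMsp_ne_nil para.toList)] at hl
  simp only [List.nil_append] at hl
  set l := pvMsp para.toList with hldef
  have hstep : (fun (d : PySem.Dict (List Char) Int) e =>
      if d.contains e = false then d.insert e 1 else d.insert e (d.getD e 0 + 1))
      = (fun (d : PySem.Dict (List Char) Int) e => d.insert e (d.getD e 0 + 1)) := by
    funext d e
    cases h : d.contains e
    · rw [PySem.Dict.getD_of_not_contains d 0 h]
      simp
    · simp
  rw [hl, hstep]
  rw [keyLoop_eq_any]
  have hkeys : ((l.foldl (fun (d : PySem.Dict (List Char) Int) e =>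
      d.insert e (d.getD e 0 + 1)) PySem.Dict.empty).keys) = PySem.Set.ofList l := by
    rw [PySem.Dict.keys_foldl_insert]
    simp [PySem.Dict.keys_empty, PySem.Set.update, PySem.Set.ofList_eq_foldl]
  rw [hkeys, hwords, ecLoop_eq_any]
  have hget : ∀ k : List Char,
      ((l.foldl (fun (d : PySem.Dict (List Char) Int) e =>
        d.insert e (d.getD e 0 + 1)) PySem.Dict.empty).getD k 0)
      = (l.count k : Int) := by
    intro k
    rw [PySem.Dict.getD_foldl_insert_add_one]
    simp [PySem.Dict.getD_empty]
  rw [any_ofList]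
  apply PySem.List.any_congr_mem
  intro x hx
  rw [hget]
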